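-- pv_equiv track=rewrite | github.com/Jish123K/basic-password-cracker | Sf.py | divide_alphabet
-- ===== SOURCE A (Python) =====
-- import string
--
-- def divide_alphabet(nprocs):
--
--     alphabet = string.ascii_lowercase
--
--     letter_counts = len(alphabet)
--
--     div_counts = letter_counts // nprocs
--
--     rem_counts = letter_counts % nprocs
--
--     letters_per_process = [div_counts] * nprocs
--
--     for i in range(rem_counts):
--
--         letters_per_process[i] += 1
--
--     distrib = {}
--
--     start_idx = 0
--
--     for i in range(nprocs):
--
--         distrib[i] = alphabet[start_idx:start_idx + letters_per_process[i]]
--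
--         start_idx += letters_per_process[i]
--
--     return distrib
-- ===== SOURCE B (Python) =====
-- import string
--
-- def divide_alphabet(nprocs):
--     # Greedy fair split: each process takes the ceiling share of the letters
--     # still remaining, and the remaining-string shrinks as we go.
--     rest = string.ascii_lowercase
--     distrib = {}
--     for k in range(nprocs, 0, -1):
--         take = -(-len(rest) // k)
--         distrib[nprocs - k] = rest[:take]
--         rest = rest[take:]
--     return distrib
-- ===== Notes on version B (the rewrite author's own statement) =====
-- stated objective: alternative
-- what changed: Replaced A's two-stage plan (precompute a letters-per-process count array from 26//n and 26%n, then slice with a mutated start_idx) by a greedy single pass with no count array: each process takes the ceiling share -(-len(rest)//k) of the remaining alphabet string, which shrinks as the loop runs.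
-- outside the precondition, e.g. on divide_alphabet(0): A raises ZeroDivisionError, B returns {}
import Mathlib
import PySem

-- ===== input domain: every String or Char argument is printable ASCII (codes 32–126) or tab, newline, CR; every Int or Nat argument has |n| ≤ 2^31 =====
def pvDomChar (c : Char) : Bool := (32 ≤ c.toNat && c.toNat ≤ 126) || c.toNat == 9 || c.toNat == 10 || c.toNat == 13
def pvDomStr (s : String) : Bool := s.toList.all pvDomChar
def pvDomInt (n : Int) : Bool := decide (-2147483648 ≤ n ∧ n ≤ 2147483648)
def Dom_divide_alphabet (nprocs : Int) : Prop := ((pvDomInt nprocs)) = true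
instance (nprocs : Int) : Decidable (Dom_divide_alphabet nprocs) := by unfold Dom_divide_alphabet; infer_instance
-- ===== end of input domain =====

-- B replaces A's precomputed div/rem count array + running start_idx by a greedy pass: each
-- process takes the ceiling share of the letters still remaining (same O(n) cost, no count array).

-- ===== PORT A =====
def divide_alphabet (nprocs : Int) : List (Int × String) :=
  let alphabet := "abcdefghijklmnopqrstuvwxyz"
  let letter_counts := PySem.Str.len alphabet
  let div_counts := PySem.Int.floordiv letter_counts nprocs
  let rem_counts := PySem.Int.mod letter_counts nprocs
  let lpp0 : List Int := List.replicate nprocs.toNat div_counts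
  -- for i in range(rem_counts): letters_per_process[i] += 1   (index always in range when nprocs ≠ 0)
  let lpp := (PySem.List.pyRange 0 rem_counts 1).foldl
      (fun l i => l.set i.toNat (PySem.List.pyGetD l i 0 + 1)) lpp0
  -- for i in range(nprocs): distrib[i] = alphabet[start:start+lpp[i]]; start += lpp[i]
  let st := (PySem.List.pyRange 0 nprocs 1).foldl
      (fun (s : PySem.Dict Int String × Int) i =>
        let c := PySem.List.pyGetD lpp i 0
        (s.1.insert i (PySem.Str.slice alphabet (some s.2) (some (s.2 + c))), s.2 + c))
      (PySem.Dict.empty, 0)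
  st.1.items

-- ===== PORT B =====
def divide_alphabet_alt (nprocs : Int) : List (Int × String) :=
  -- for k in range(nprocs, 0, -1): take = -(-len(rest)//k); distrib[nprocs-k] = rest[:take]; rest = rest[take:]
  let st := (PySem.List.pyRange nprocs 0 (-1)).foldl
      (fun (s : PySem.Dict Int String × String) k =>
        let take := -(PySem.Int.floordiv (-(PySem.Str.len s.2)) k)
        (s.1.insert (nprocs - k) (PySem.Str.slice s.2 none (some take)),
         PySem.Str.slice s.2 (some take) none))
      (PySem.Dict.empty, "abcdefghijklmnopqrstuvwxyz")
  st.1.items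

-- ===== PRECONDITION & SPEC =====
-- Pre_ excludes exactly nprocs = 0, where Python A raises ZeroDivisionError (B returns {} there).
def Pre_divide_alphabet (nprocs : Int) : Prop := nprocs ≠ 0
instance (nprocs : Int) : Decidable (Pre_divide_alphabet nprocs) := by unfold Pre_divide_alphabet; infer_instance
def pvWitness_divide_alphabet : Int := 4

def Spec_divide_alphabet (nprocs : Int) (out : List (Int × String)) : Prop := out = divide_alphabet_alt nprocs
instance (nprocs : Int) (out : List (Int × String)) : Decidable (Spec_divide_alphabet nprocs out) := by unfold Spec_divide_alphabet; infer_instance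

-- ===== CLAIM (what is proved, stated in full; the proofs are below) =====
def Claim_equal_divide_alphabet : Prop := ∀ (nprocs : Int), Dom_divide_alphabet nprocs → Pre_divide_alphabet nprocs → Spec_divide_alphabet nprocs (divide_alphabet nprocs)

-- ===== LEMMAS AND PROOFS =====

-- the intended per-process letter count and closed-form start offset
def pvCnt (n i : Int) : Int := PySem.Int.floordiv 26 n + (if i < PySem.Int.mod 26 n then 1 else 0)
def pvStt (n i : Int) : Int := i * PySem.Int.floordiv 26 n + min i (PySem.Int.mod 26 n)
def pvG (n i : Int) : Int × String :=
  (i, PySem.Str.slice "abcdefghijklmnopqrstuvwxyz" (some (pvStt n i)) (some (pvStt n i + pvCnt n i)))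

-- the letters_per_process array after the increment loop: k ones added at the front
lemma pvLpp_eq (d : Int) (k n : Nat) (hk : k ≤ n) :
    (PySem.List.pyRange 0 (k : Int) 1).foldl
      (fun l i => l.set i.toNat (PySem.List.pyGetD l i 0 + 1)) (List.replicate n d)
      = List.replicate k (d + 1) ++ List.replicate (n - k) d := by
  induction k with
  | zero => simp [PySem.List.pyRange_one_eq_nil]
  | succ k ih =>
    have hk' : k ≤ n := Nat.le_of_succ_le hk
    have h1 : ((k : Int)) + 1 = ((k + 1 : Nat) : Int) := by push_cast; ring
    rw [← h1, PySem.List.pyRange_one_succ_right (by exact_mod_cast Nat.zero_le k),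
        List.foldl_append, ih hk']
    have hget : PySem.List.pyGetD (List.replicate k (d + 1) ++ List.replicate (n - k) d) (k : Int) 0 = d := by
      rw [PySem.List.pyGetD_of_nonneg _ _ (by exact_mod_cast Nat.zero_le k), Int.toNat_natCast,
          List.getD_eq_getElem?_getD, List.getElem?_append_right (by simp),
          List.length_replicate, Nat.sub_self, List.getElem?_replicate, if_pos (by omega)]
      rfl
    simp only [List.foldl_cons, List.foldl_nil, hget, Int.toNat_natCast]
    have hnk : n - k = (n - (k + 1)) + 1 := by omega
    rw [List.set_append_right _ _ (by simp), List.length_replicate, Nat.sub_self,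
        hnk, List.replicate_succ, List.set_cons_zero, List.replicate_succ' (n := k), List.append_assoc]
    simp

lemma pvGetLpp (n : Int) (hn : 0 < n) (i : Int) (h0 : 0 ≤ i) (hi : i < n) :
    PySem.List.pyGetD
      ((PySem.List.pyRange 0 (PySem.Int.mod 26 n) 1).foldl
        (fun l i => l.set i.toNat (PySem.List.pyGetD l i 0 + 1))
        (List.replicate n.toNat (PySem.Int.floordiv 26 n))) i 0 = pvCnt n i := by
  have hr0 : 0 ≤ PySem.Int.mod 26 n := PySem.Int.mod_nonneg 26 hn
  have hrn : PySem.Int.mod 26 n < n := PySem.Int.mod_lt 26 hn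
  have hcast : PySem.Int.mod 26 n = ((PySem.Int.mod 26 n).toNat : Int) := by omega
  rw [hcast, pvLpp_eq _ _ _ (by omega)]
  rw [PySem.List.pyGetD_of_nonneg _ _ h0]
  unfold pvCnt
  rw [List.getD_eq_getElem?_getD]
  by_cases hlt : i < PySem.Int.mod 26 n
  · rw [List.getElem?_append_left (by simp; omega), List.getElem?_replicate, if_pos (by omega)]
    simp [hlt]
  · rw [List.getElem?_append_right (by simp; omega), List.length_replicate,
        List.getElem?_replicate, if_pos (by omega)]
    simp [hlt]

lemma pvStt_step (n : Int) (j : Int) :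
    pvStt n j + pvCnt n j = pvStt n (j + 1) := by
  unfold pvStt pvCnt
  by_cases h : PySem.Int.mod 26 n ≤ j
  · rw [min_eq_right h, min_eq_right (by omega), if_neg (by omega)]; ring
  · rw [min_eq_left (by omega), min_eq_left (by omega), if_pos (by omega)]; ring

-- the main loop of A, characterised: dict items are the closed-form slices, start is pvStt
lemma pvMain (n : Int) (hn : 0 < n) (m : Nat) (hm : (m : Int) ≤ n) :
    (PySem.List.pyRange 0 (m : Int) 1).foldl
      (fun (s : PySem.Dict Int String × Int) i =>
        (s.1.insert i (PySem.Str.slice "abcdefghijklmnopqrstuvwxyz" (some s.2)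
          (some (s.2 + PySem.List.pyGetD
            ((PySem.List.pyRange 0 (PySem.Int.mod 26 n) 1).foldl
              (fun l i => l.set i.toNat (PySem.List.pyGetD l i 0 + 1))
              (List.replicate n.toNat (PySem.Int.floordiv 26 n))) i 0))),
         s.2 + PySem.List.pyGetD
            ((PySem.List.pyRange 0 (PySem.Int.mod 26 n) 1).foldl
              (fun l i => l.set i.toNat (PySem.List.pyGetD l i 0 + 1))
              (List.replicate n.toNat (PySem.Int.floordiv 26 n))) i 0))
      (PySem.Dict.empty, 0)
      = (PySem.Dict.mk ((PySem.List.pyRange 0 (m : Int) 1).map (pvG n)), pvStt n m) := by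
  induction m with
  | zero =>
    simp [PySem.List.pyRange_one_eq_nil, pvStt, PySem.Dict.empty]
    have := PySem.Int.mod_nonneg 26 hn
    omega
  | succ m ih =>
    have hm' : (m : Int) ≤ n := by push_cast at hm ⊢; omega
    have h1 : ((m : Int)) + 1 = ((m + 1 : Nat) : Int) := by push_cast; ring
    rw [← h1, PySem.List.pyRange_one_succ_right (by exact_mod_cast Nat.zero_le m),
        List.foldl_append, ih hm']
    simp only [List.foldl_cons, List.foldl_nil]
    have hmn : (m : Int) < n := by omega
    rw [pvGetLpp n hn (m : Int) (by exact_mod_cast Nat.zero_le m) hmn]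
    have hstart := pvStt_step n (m : Int)
    have hfresh : (PySem.Dict.mk ((PySem.List.pyRange 0 (m : Int) 1).map (pvG n))).contains (m : Int) = false := by
      rw [PySem.Dict.contains_mk]
      simp only [List.any_eq_false]
      intro p hp
      simp only [List.mem_map] at hp
      obtain ⟨j, hj, rfl⟩ := hp
      rw [PySem.List.mem_pyRange_one] at hj
      simp [pvG]
      omega
    rw [Prod.mk.injEq]
    constructor
    · apply PySem.Dict.ext
      rw [PySem.Dict.items_insert_of_not_contains _ _ hfresh]
      simp [List.map_append, pvG, hstart]
    · rw [hstart]

-- ===== B-side lemmas =====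

def pvABl : List Char := "abcdefghijklmnopqrstuvwxyz".toList

def pvStepB (n : Int) (s : PySem.Dict Int String × String) (k : Int) : PySem.Dict Int String × String :=
  (s.1.insert (n - k)
     (PySem.Str.slice s.2 none (some (-(PySem.Int.floordiv (-(PySem.Str.len s.2)) k)))),
   PySem.Str.slice s.2 (some (-(PySem.Int.floordiv (-(PySem.Str.len s.2)) k))) none)

lemma pvAlt_unfold (n : Int) :
    divide_alphabet_alt n
      = (((PySem.List.pyRange n 0 (-1)).foldl (pvStepB n)
          (PySem.Dict.empty, "abcdefghijklmnopqrstuvwxyz")).1).items := rfl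

lemma pvDiv_nn (n : Int) (hn : 0 < n) : 0 ≤ PySem.Int.floordiv 26 n := by
  rw [PySem.Int.floordiv_eq_ediv_of_pos hn]
  exact Int.ediv_nonneg (by omega) (by omega)

lemma pvCnt_nn (n j : Int) (hn : 0 < n) : 0 ≤ pvCnt n j := by
  have := pvDiv_nn n hn
  unfold pvCnt; split_ifs <;> omega

lemma pvStt_nn (n j : Int) (hn : 0 < n) (h0 : 0 ≤ j) : 0 ≤ pvStt n j := by
  have hd := pvDiv_nn n hn
  have hr := PySem.Int.mod_nonneg 26 hn
  unfold pvStt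
  have : 0 ≤ j * PySem.Int.floordiv 26 n := mul_nonneg h0 hd
  have : 0 ≤ min j (PySem.Int.mod 26 n) := le_min h0 hr
  omega

lemma pvStt_top (n : Int) (hn : 0 < n) : pvStt n n = 26 := by
  have h26 := PySem.Int.floordiv_mul_add_mod 26 n
  have hrn := PySem.Int.mod_lt 26 hn
  unfold pvStt
  rw [min_eq_right (by omega)]
  nlinarith [h26]

lemma pvStt_le26 (n j : Int) (hn : 0 < n) (_h0 : 0 ≤ j) (hj : j ≤ n) : pvStt n j ≤ 26 := by
  have hd := pvDiv_nn n hn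
  have hrn := PySem.Int.mod_lt 26 hn
  have htop := pvStt_top n hn
  unfold pvStt at htop ⊢
  have hmul : j * PySem.Int.floordiv 26 n ≤ n * PySem.Int.floordiv 26 n :=
    mul_le_mul_of_nonneg_right hj hd
  have hmin : min j (PySem.Int.mod 26 n) ≤ min n (PySem.Int.mod 26 n) := by
    exact min_le_min hj (le_refl _)
  omega

-- the greedy ceiling share of the remaining letters is exactly pvCnt
lemma pvTake (n j : Int) (hn : 0 < n) (_h0 : 0 ≤ j) (hj : j < n) :
    -(PySem.Int.floordiv (-(26 - pvStt n j)) (n - j)) = pvCnt n j := by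
  rw [PySem.Int.neg_floordiv_neg_eq_iff_of_pos (by omega)]
  have h26 := PySem.Int.floordiv_mul_add_mod 26 n
  have hr0 := PySem.Int.mod_nonneg 26 hn
  have hrn := PySem.Int.mod_lt 26 hn
  unfold pvStt pvCnt
  by_cases h : j < PySem.Int.mod 26 n
  · rw [min_eq_left (by omega), if_pos h]
    constructor <;> nlinarith [h26]
  · rw [min_eq_right (by omega), if_neg h]
    constructor <;> nlinarith [h26]

-- B's fold, characterised: starting with k = m processes left and the alphabet suffix from
-- pvStt n (n-m), it inserts the closed-form slice for each j in [n-m, n) and empties the rest.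
lemma pvBmain (n : Int) (hn : 0 < n) (m : Nat) (hm : (m : Int) ≤ n) (d : PySem.Dict Int String) :
    (PySem.List.pyRange (m : Int) 0 (-1)).foldl (pvStepB n)
      (d, String.ofList (pvABl.drop (pvStt n (n - m)).toNat))
    = ((PySem.List.pyRange (n - m) n 1).foldl (fun dd j => dd.insert j (pvG n j).2) d,
       String.ofList (pvABl.drop 26)) := by
  induction m generalizing d with
  | zero =>
    rw [PySem.List.pyRange_neg_one_eq_nil (by omega), PySem.List.pyRange_one_eq_nil (by omega)]
    simp [pvStt_top n hn]
  | succ m ih =>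
    have hm' : (m : Int) ≤ n := by push_cast at hm ⊢; omega
    have hmn : ((m : Int)) + 1 ≤ n := by push_cast at hm; omega
    have hj0 : (0 : Int) ≤ n - ((m : Int) + 1) := by omega
    have hjn : n - ((m : Int) + 1) < n := by omega
    have hc0 : 0 ≤ pvCnt n (n - ((m : Int) + 1)) := pvCnt_nn n _ hn
    have hs0 : 0 ≤ pvStt n (n - ((m : Int) + 1)) := pvStt_nn n _ hn hj0
    have hs26 : pvStt n (n - ((m : Int) + 1)) ≤ 26 := pvStt_le26 n _ hn hj0 (by omega)
    have hlen : pvABl.length = 26 := by decide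
    push_cast
    rw [PySem.List.pyRange_neg_one_cons (by omega : (0 : Int) < (m : Int) + 1)]
    simp only [List.foldl_cons]
    have hrest : (String.ofList (pvABl.drop (pvStt n (n - ((m : Int) + 1))).toNat)).toList
        = pvABl.drop (pvStt n (n - ((m : Int) + 1))).toNat := by simp
    have hlenr : PySem.Str.len (String.ofList (pvABl.drop (pvStt n (n - ((m : Int) + 1))).toNat))
        = 26 - pvStt n (n - ((m : Int) + 1)) := by
      simp only [PySem.Str.len, hrest, List.length_drop, hlen]
      omega
    have hT : -(PySem.Int.floordiv
          (-(PySem.Str.len (String.ofList (pvABl.drop (pvStt n (n - ((m : Int) + 1))).toNat))))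
          ((m : Int) + 1)) = pvCnt n (n - ((m : Int) + 1)) := by
      have h := pvTake n _ hn hj0 hjn
      rw [show n - (n - ((m : Int) + 1)) = (m : Int) + 1 from by omega] at h
      rw [hlenr]
      exact h
    have hslice1 : PySem.Str.slice (String.ofList (pvABl.drop (pvStt n (n - ((m : Int) + 1))).toNat))
          none (some (pvCnt n (n - ((m : Int) + 1)))) = (pvG n (n - ((m : Int) + 1))).2 := by
      simp only [pvG, PySem.Str.slice, PySem.Chars.slice, hrest]
      congr 1
      rw [PySem.List.slice_to _ hc0, PySem.List.slice_toNat _ hs0 (by omega)]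
      congr 1
      omega
    have hslice2 : PySem.Str.slice (String.ofList (pvABl.drop (pvStt n (n - ((m : Int) + 1))).toNat))
          (some (pvCnt n (n - ((m : Int) + 1)))) none
        = String.ofList (pvABl.drop (pvStt n (n - (m : Int))).toNat) := by
      simp only [PySem.Str.slice, PySem.Chars.slice, hrest]
      congr 1
      rw [PySem.List.slice_from _ hc0, List.drop_drop]
      congr 1
      have hstep := pvStt_step n (n - ((m : Int) + 1))
      have hj1 : n - ((m : Int) + 1) + 1 = n - (m : Int) := by omega
      rw [← hj1, ← hstep]
      omega
    have hstep : pvStepB n (d, String.ofList (pvABl.drop (pvStt n (n - ((m : Int) + 1))).toNat)) ((m : Int) + 1)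
        = (d.insert (n - ((m : Int) + 1)) (pvG n (n - ((m : Int) + 1))).2,
           String.ofList (pvABl.drop (pvStt n (n - (m : Int))).toNat)) := by
      unfold pvStepB
      simp only [hT, hslice1, hslice2]
    rw [show ((m : Int) + 1 - 1) = (m : Int) from by ring, hstep, ih hm']
    refine congrArg (fun x => (x, String.ofList (pvABl.drop 26))) ?_
    rw [PySem.List.pyRange_one_cons (by omega : n - ((m : Int) + 1) < n)]
    simp only [List.foldl_cons]
    congr 2
    omega

-- B equals the closed-form slice list, for positive n
lemma pvAltEq (n : Int) (hn : 0 < n) :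
    divide_alphabet_alt n = (PySem.List.pyRange 0 n 1).map (pvG n) := by
  rw [pvAlt_unfold]
  have hstt0 : pvStt n 0 = 0 := by
    have hr := PySem.Int.mod_nonneg 26 hn
    unfold pvStt
    rw [zero_mul, min_eq_left hr, zero_add]
  have hinit : ("abcdefghijklmnopqrstuvwxyz" : String)
      = String.ofList (pvABl.drop (pvStt n (n - (n.toNat : Nat))).toNat) := by
    have h0 : n - ((n.toNat : Nat) : Int) = 0 := by omega
    rw [h0, hstt0]
    decide
  have hn' : n = ((n.toNat : Nat) : Int) := by omega
  rw [hinit]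
  rw [show PySem.List.pyRange n 0 (-1) = PySem.List.pyRange ((n.toNat : Nat) : Int) 0 (-1) from by rw [← hn']]
  rw [pvBmain n hn n.toNat (by omega) PySem.Dict.empty]
  have h0 : n - ((n.toNat : Nat) : Int) = 0 := by omega
  rw [h0]
  rw [PySem.Dict.items_foldl_insert_fresh (PySem.List.pyRange 0 n 1) (fun a => a)
        (fun j => (pvG n j).2) PySem.Dict.empty
        (fun a _ => PySem.Dict.contains_empty a)
        (by simpa using PySem.List.nodup_pyRange_one 0 n)]
  rw [show (PySem.Dict.empty : PySem.Dict Int String).items = [] from rfl, List.nil_append]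
  exact List.map_congr_left (fun a _ => rfl)

-- ===== VERDICT (by name: the statement is the Claim_ definition above) =====
theorem divide_alphabet_spec : Claim_equal_divide_alphabet := by
  intro nprocs _ hpre
  unfold Spec_divide_alphabet
  rcases lt_or_gt_of_ne hpre with hneg | hpos
  · -- nprocs < 0: both loops run over the empty range
    unfold divide_alphabet divide_alphabet_alt
    simp [PySem.List.pyRange_one_eq_nil (le_of_lt hneg),
          PySem.List.pyRange_neg_one_eq_nil (le_of_lt hneg), PySem.Dict.empty]
  · -- nprocs > 0
    rw [pvAltEq nprocs hpos]
    unfold divide_alphabet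
    simp only [PySem.Str.len]
    have hlen : (("abcdefghijklmnopqrstuvwxyz" : String).toList.length : Int) = 26 := by decide
    rw [hlen]
    have hm : nprocs = ((nprocs.toNat : Nat) : Int) := by omega
    have hrange : PySem.List.pyRange 0 nprocs 1 = PySem.List.pyRange 0 ((nprocs.toNat : Nat) : Int) 1 := by
      rw [← hm]
    rw [hrange, pvMain nprocs hpos nprocs.toNat (by omega), ← hrange]
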